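-- pv_equiv track=rewrite | github.com/liskos/kudryshov | variansfoxford/var4/12.py | f
-- ===== SOURCE A (Python) =====
-- def f(n):
--         s = ">" + 37 * "1" + n * "2" + 37 * "3"
--         while (">1" in s) or (">2" in s) or (">3" in s):
--             if ">1" in s:
--                 s = s.replace(">1","33>",1)
--             if ">2" in s:
--                 s = s.replace(">2", "2>", 1)
--             if ">3" in s:
--                 s = s.replace(">3", "1>", 1)
--         return s
-- ===== SOURCE B (Python) =====
-- def f(n):
--     # Closed form: each of the 37 leading 1s becomes "33" behind the marker,
--     # each 2 is carried over unchanged, each trailing 3 becomes a "1",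
--     # and the marker ends at the right end.
--     return "3" * 74 + "2" * n + "1" * 37 + ">"
-- ===== Notes on version B (the rewrite author's own statement) =====
-- stated objective: faster
-- what changed: Replaces the marker-rewriting simulation loop (repeated substring search and replace on a growing string) by the closed-form result string built directly from n.
import Mathlib
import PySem

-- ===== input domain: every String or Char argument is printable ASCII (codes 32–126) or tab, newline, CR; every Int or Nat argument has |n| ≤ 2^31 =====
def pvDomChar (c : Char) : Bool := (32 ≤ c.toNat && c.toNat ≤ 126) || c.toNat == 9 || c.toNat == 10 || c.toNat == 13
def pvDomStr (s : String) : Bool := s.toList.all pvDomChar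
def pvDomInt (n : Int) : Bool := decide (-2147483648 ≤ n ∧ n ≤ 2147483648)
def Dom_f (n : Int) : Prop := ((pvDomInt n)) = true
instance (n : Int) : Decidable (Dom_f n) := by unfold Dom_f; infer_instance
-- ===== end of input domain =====

-- B replaces A's marker-rewriting simulation loop by the closed-form result string (objective: faster).

-- ===== PORT A =====
-- s.replace(old, new, 1): replace the FIRST occurrence of old (hand-ported
-- because PySem.Str.replace has no count argument; exact for the nonempty
-- patterns A uses, on the occurring strings).
def fRep1 (old neww : List Char) : List Char → List Char
  | [] => []
  | c :: t =>
    if old.isPrefixOf (c :: t) then neww ++ (c :: t).drop old.length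
    else c :: fRep1 old neww t

-- the three sequential 'if ">x" in s: s = s.replace(...)' statements of A's loop body
def fStep1 (s : List Char) : List Char :=
  if PySem.Chars.isIn ['>', '1'] s then fRep1 ['>', '1'] ['3', '3', '>'] s else s
def fStep2 (s : List Char) : List Char :=
  if PySem.Chars.isIn ['>', '2'] s then fRep1 ['>', '2'] ['2', '>'] s else s
def fStep3 (s : List Char) : List Char :=
  if PySem.Chars.isIn ['>', '3'] s then fRep1 ['>', '3'] ['1', '>'] s else s

-- A's while loop; the fuel argument only makes the recursion total (each
-- iteration consumes at least one symbol right of '>', so 75 + n.toNat suffice)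
def fLoop : Nat → List Char → List Char
  | 0, s => s
  | Nat.succ fuel, s =>
    if PySem.Chars.isIn ['>', '1'] s || PySem.Chars.isIn ['>', '2'] s || PySem.Chars.isIn ['>', '3'] s then
      fLoop fuel (fStep3 (fStep2 (fStep1 s)))
    else s

def f (n : Int) : String :=
  String.ofList (fLoop (75 + n.toNat)
    ('>' :: (List.replicate 37 '1' ++ PySem.List.pyRepeat ['2'] n ++ List.replicate 37 '3')))

-- ===== PORT B =====
def f_alt (n : Int) : String :=
  String.ofList (List.replicate 74 '3' ++ PySem.List.pyRepeat ['2'] n ++ List.replicate 37 '1' ++ ['>'])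

-- ===== PRECONDITION & SPEC =====
def Spec_f (n : Int) (out : String) : Prop := out = f_alt n
instance (n : Int) (out : String) : Decidable (Spec_f n out) := by unfold Spec_f; infer_instance

-- ===== CLAIM (what is proved, stated in full; the proofs are below) =====
def Claim_equal_f : Prop := ∀ (n : Int), Dom_f n → Spec_f n (f n)

-- ===== LEMMAS AND PROOFS =====

-- ['>', x] occurs in L ++ '>' :: R (with '>' nowhere in L or R) iff R starts with x
theorem pv_pair_infix_iff {x : Char} {L R : List Char} (hL : '>' ∉ L) (hR : '>' ∉ R) :
    (['>', x] <:+: (L ++ '>' :: R)) ↔ R.head? = some x := by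
  constructor
  · intro h
    induction L with
    | nil =>
      rcases h with ⟨s, t, hst⟩
      cases s with
      | nil =>
        simp only [List.nil_append, List.cons_append, List.cons.injEq] at hst
        simp [← hst.2]
      | cons a s' =>
        simp only [List.nil_append, List.cons_append, List.cons.injEq] at hst
        exact absurd (hst.2 ▸ (by simp : '>' ∈ s' ++ ['>', x] ++ t)) hR
    | cons a L' ih =>
      rcases h with ⟨s, t, hst⟩
      cases s with
      | nil =>
        simp only [List.nil_append, List.cons_append, List.cons.injEq] at hst
        exact absurd (hst.1 ▸ List.mem_cons_self) hL
      | cons b s' =>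
        simp only [List.cons_append, List.cons.injEq] at hst
        exact ih (fun hm => hL (List.mem_cons_of_mem _ hm)) ⟨s', t, by simpa using hst.2⟩
  · intro h
    cases R with
    | nil => simp at h
    | cons y R' =>
      simp only [List.head?_cons, Option.some.injEq] at h
      exact ⟨L, R', by simp [h]⟩

theorem pv_cond_eq (x : Char) (L R : List Char) (hL : '>' ∉ L) (hR : '>' ∉ R) :
    PySem.Chars.isIn ['>', x] (L ++ '>' :: R) = decide (R.head? = some x) := by
  by_cases h : R.head? = some x
  · simp [h, PySem.Chars.isIn_iff_infix, (pv_pair_infix_iff hL hR).2 h]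
  · cases hb : PySem.Chars.isIn ['>', x] (L ++ '>' :: R) with
    | true =>
      rw [PySem.Chars.isIn_iff_infix] at hb
      exact absurd ((pv_pair_infix_iff hL hR).1 hb) h
    | false => simp [h]

theorem pv_rep1_eq (x : Char) (w : List Char) (L R : List Char) (hL : '>' ∉ L) :
    fRep1 ['>', x] w (L ++ '>' :: x :: R) = L ++ w ++ R := by
  induction L with
  | nil => simp [fRep1, List.isPrefixOf]
  | cons a L' ih =>
    have ha : a ≠ '>' := fun h => hL (h ▸ List.mem_cons_self)
    simp only [List.cons_append, fRep1]
    rw [if_neg (by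
      simp only [List.isPrefixOf, Bool.and_eq_true, beq_iff_eq, not_and]
      intro h; exact absurd h.symm ha)]
    simp [ih (fun hm => hL (List.mem_cons_of_mem _ hm))]

theorem pv_cond_hit (x : Char) (L R : List Char) (hL : '>' ∉ L) (hR : '>' ∉ R) (hx : x ≠ '>') :
    PySem.Chars.isIn ['>', x] (L ++ '>' :: x :: R) = true := by
  rw [pv_cond_eq x L (x :: R) hL (by simp [hR, Ne.symm hx])]; simp

theorem pv_cond_miss (x y : Char) (L R : List Char) (hL : '>' ∉ L) (hR : '>' ∉ R)
    (hy : y ≠ '>') (hxy : y ≠ x) :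
    PySem.Chars.isIn ['>', x] (L ++ '>' :: y :: R) = false := by
  rw [pv_cond_eq x L (y :: R) hL (by simp [hR, Ne.symm hy])]; simp [hxy]

theorem pv_cond_nil (x : Char) (L : List Char) (hL : '>' ∉ L) :
    PySem.Chars.isIn ['>', x] (L ++ ['>']) = false := by
  rw [show L ++ ['>'] = L ++ '>' :: ([] : List Char) from rfl,
      pv_cond_eq x L [] hL (by simp)]; simp

theorem pv_step1_hit (L R : List Char) (hL : '>' ∉ L) (hR : '>' ∉ R) :
    fStep1 (L ++ '>' :: '1' :: R) = (L ++ ['3', '3']) ++ '>' :: R := by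
  unfold fStep1
  rw [pv_cond_hit '1' L R hL hR (by decide), if_pos rfl,
      pv_rep1_eq '1' ['3', '3', '>'] L R hL]
  simp

theorem pv_step2_hit (L R : List Char) (hL : '>' ∉ L) (hR : '>' ∉ R) :
    fStep2 (L ++ '>' :: '2' :: R) = (L ++ ['2']) ++ '>' :: R := by
  unfold fStep2
  rw [pv_cond_hit '2' L R hL hR (by decide), if_pos rfl,
      pv_rep1_eq '2' ['2', '>'] L R hL]
  simp

theorem pv_step3_hit (L R : List Char) (hL : '>' ∉ L) (hR : '>' ∉ R) :
    fStep3 (L ++ '>' :: '3' :: R) = (L ++ ['1']) ++ '>' :: R := by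
  unfold fStep3
  rw [pv_cond_hit '3' L R hL hR (by decide), if_pos rfl,
      pv_rep1_eq '3' ['1', '>'] L R hL]
  simp

theorem pv_step1_miss (L R : List Char) (hL : '>' ∉ L) (hR : '>' ∉ R)
    (hh : R.head? ≠ some '1') : fStep1 (L ++ '>' :: R) = L ++ '>' :: R := by
  unfold fStep1
  rw [pv_cond_eq '1' L R hL hR]
  simp [hh]

theorem pv_step2_miss (L R : List Char) (hL : '>' ∉ L) (hR : '>' ∉ R)
    (hh : R.head? ≠ some '2') : fStep2 (L ++ '>' :: R) = L ++ '>' :: R := by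
  unfold fStep2
  rw [pv_cond_eq '2' L R hL hR]
  simp [hh]

theorem pv_step3_miss (L R : List Char) (hL : '>' ∉ L) (hR : '>' ∉ R)
    (hh : R.head? ≠ some '3') : fStep3 (L ++ '>' :: R) = L ++ '>' :: R := by
  unfold fStep3
  rw [pv_cond_eq '3' L R hL hR]
  simp [hh]

theorem pv_no_gt_23 (d e : Nat) :
    '>' ∉ (List.replicate d '2' ++ List.replicate e '3') := by
  simp [List.mem_append, List.mem_replicate]

-- phase 3: only 3s remain

-- loop invariant, in three phases over the right part 1^c 2^d 3^e of the state
theorem pv_phase3 : ∀ (e fuel : Nat) (L : List Char), '>' ∉ L → e ≤ fuel →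
    fLoop fuel (L ++ '>' :: List.replicate e '3') = L ++ List.replicate e '1' ++ ['>'] := by
  intro e
  induction e with
  | zero =>
    intro fuel L hL _
    cases fuel with
    | zero => simp [fLoop]
    | succ fuel =>
      simp only [fLoop, List.replicate_zero]
      rw [show L ++ '>' :: ([] : List Char) = L ++ ['>'] from rfl,
          pv_cond_nil '1' L hL, pv_cond_nil '2' L hL, pv_cond_nil '3' L hL]
      simp
  | succ e ih =>
    intro fuel L hL hf
    cases fuel with
    | zero => omega
    | succ fuel =>
      have hR : '>' ∉ List.replicate e '3' := by simp [List.mem_replicate]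
      simp only [fLoop, List.replicate_succ]
      rw [pv_cond_miss '1' '3' L _ hL hR (by decide) (by decide),
          pv_cond_miss '2' '3' L _ hL hR (by decide) (by decide),
          pv_cond_hit '3' L _ hL hR (by decide)]
      simp only [Bool.false_or]
      rw [pv_step1_miss L _ hL (by simp [hR]) (by simp),
          pv_step2_miss L _ hL (by simp [hR]) (by simp),
          pv_step3_hit L _ hL hR]
      rw [ih fuel (L ++ ['1']) (by simp [hL]) (by omega)]
      simp

-- phase 2: 2s then 3s remain

theorem pv_phase2 : ∀ (d e fuel : Nat) (L : List Char), '>' ∉ L → d + e ≤ fuel →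
    fLoop fuel (L ++ '>' :: (List.replicate d '2' ++ List.replicate e '3'))
      = L ++ List.replicate d '2' ++ List.replicate e '1' ++ ['>'] := by
  intro d
  induction d with
  | zero =>
    intro e fuel L hL hf
    simp only [List.replicate_zero, List.nil_append]
    rw [pv_phase3 e fuel L hL (by omega)]
    simp
  | succ d ih =>
    intro e fuel L hL hf
    cases fuel with
    | zero => omega
    | succ fuel =>
      have hR : '>' ∉ (List.replicate d '2' ++ List.replicate e '3') := pv_no_gt_23 d e
      simp only [fLoop, List.replicate_succ, List.cons_append]
      rw [pv_cond_miss '1' '2' L _ hL hR (by decide) (by decide),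
          pv_cond_hit '2' L _ hL hR (by decide)]
      simp only [Bool.false_or, Bool.true_or]
      rw [pv_step1_miss L _ hL (by simp [hR]) (by simp),
          pv_step2_hit L _ hL hR]
      cases d with
      | zero =>
        cases e with
        | zero =>
          rw [show (List.replicate 0 '2' ++ List.replicate 0 '3' : List Char) = [] from rfl,
              pv_step3_miss (L ++ ['2']) [] (by simp [hL]) (by simp) (by simp)]
          rw [show (L ++ ['2']) ++ '>' :: ([] : List Char)
                = (L ++ ['2']) ++ '>' :: (List.replicate 0 '3') from rfl,
              pv_phase3 0 fuel (L ++ ['2']) (by simp [hL]) (by omega)]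
          simp
        | succ e =>
          rw [show (List.replicate 0 '2' ++ List.replicate (e + 1) '3' : List Char)
                = '3' :: List.replicate e '3' by simp [List.replicate_succ]]
          rw [pv_step3_hit (L ++ ['2']) _ (by simp [hL]) (by simp [List.mem_replicate])]
          rw [pv_phase3 e fuel ((L ++ ['2']) ++ ['1']) (by simp [hL]) (by omega)]
          simp [List.replicate_succ]
      | succ d' =>
        rw [show (List.replicate (d' + 1) '2' ++ List.replicate e '3' : List Char)
              = '2' :: (List.replicate d' '2' ++ List.replicate e '3') by
                simp [List.replicate_succ]]
        rw [pv_step3_miss (L ++ ['2']) _ (by simp [hL]) (by simp [pv_no_gt_23 d' e]) (by simp)]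
        rw [show ((L ++ ['2']) ++ '>' :: ('2' :: (List.replicate d' '2' ++ List.replicate e '3')))
              = (L ++ ['2']) ++ '>' :: (List.replicate (d' + 1) '2' ++ List.replicate e '3') by
                simp [List.replicate_succ]]
        rw [ih e fuel (L ++ ['2']) (by simp [hL]) (by omega)]
        simp [List.replicate_succ]

-- phase 1: full state 1^c 2^d 3^e

theorem pv_phase1 : ∀ (c d e fuel : Nat) (L : List Char), '>' ∉ L → c + d + e ≤ fuel →
    fLoop fuel (L ++ '>' :: (List.replicate c '1' ++ (List.replicate d '2' ++ List.replicate e '3')))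
      = L ++ List.replicate (2 * c) '3' ++ List.replicate d '2' ++ List.replicate e '1' ++ ['>'] := by
  intro c
  induction c with
  | zero =>
    intro d e fuel L hL hf
    simp only [List.replicate_zero, List.nil_append, Nat.mul_zero]
    rw [pv_phase2 d e fuel L hL (by omega)]
    simp
  | succ c ih =>
    intro d e fuel L hL hf
    cases fuel with
    | zero => omega
    | succ fuel =>
      have h3 : List.replicate (2 * (c + 1)) '3' = ['3', '3'] ++ List.replicate (2 * c) '3' := by
        rw [show 2 * (c + 1) = 2 + 2 * c by omega, List.replicate_add]
        rfl
      rw [h3]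
      have hR : '>' ∉ (List.replicate c '1' ++ (List.replicate d '2' ++ List.replicate e '3')) := by
        simp [List.mem_replicate]
      simp only [fLoop, List.replicate_succ, List.cons_append]
      rw [pv_cond_hit '1' L _ hL hR (by decide)]
      simp only [Bool.true_or]
      rw [pv_step1_hit L _ hL hR]
      cases c with
      | succ c' =>
        rw [show (List.replicate (c' + 1) '1' ++ (List.replicate d '2' ++ List.replicate e '3') : List Char)
              = '1' :: (List.replicate c' '1' ++ (List.replicate d '2' ++ List.replicate e '3')) by
                simp [List.replicate_succ]]
        rw [pv_step2_miss (L ++ ['3', '3']) _ (by simp [hL])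
              (by simp [List.mem_replicate]) (by simp),
            pv_step3_miss (L ++ ['3', '3']) _ (by simp [hL])
              (by simp [List.mem_replicate]) (by simp)]
        rw [show ((L ++ ['3', '3']) ++ '>' :: ('1' :: (List.replicate c' '1' ++ (List.replicate d '2' ++ List.replicate e '3'))))
              = (L ++ ['3', '3']) ++ '>' :: (List.replicate (c' + 1) '1' ++ (List.replicate d '2' ++ List.replicate e '3')) by
                simp [List.replicate_succ]]
        rw [ih d e fuel (L ++ ['3', '3']) (by simp [hL]) (by omega)]
        simp
      | zero =>
        simp only [List.replicate_zero, List.nil_append]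
        cases d with
        | succ d' =>
          rw [show (List.replicate (d' + 1) '2' ++ List.replicate e '3' : List Char)
                = '2' :: (List.replicate d' '2' ++ List.replicate e '3') by
                  simp [List.replicate_succ]]
          rw [pv_step2_hit (L ++ ['3', '3']) _ (by simp [hL]) (pv_no_gt_23 d' e)]
          cases d' with
          | succ d'' =>
            rw [show (List.replicate (d'' + 1) '2' ++ List.replicate e '3' : List Char)
                  = '2' :: (List.replicate d'' '2' ++ List.replicate e '3') by
                    simp [List.replicate_succ]]
            rw [pv_step3_miss ((L ++ ['3', '3']) ++ ['2']) _ (by simp [hL])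
                  (by simp [pv_no_gt_23 d'' e]) (by simp)]
            rw [show (((L ++ ['3', '3']) ++ ['2']) ++ '>' :: ('2' :: (List.replicate d'' '2' ++ List.replicate e '3')))
                  = ((L ++ ['3', '3']) ++ ['2']) ++ '>' :: (List.replicate (d'' + 1) '2' ++ List.replicate e '3') by
                    simp [List.replicate_succ]]
            rw [pv_phase2 (d'' + 1) e fuel ((L ++ ['3', '3']) ++ ['2']) (by simp [hL]) (by omega)]
            simp [List.replicate_succ]
          | zero =>
            simp only [List.replicate_zero, List.nil_append]
            cases e with
            | succ e' =>
              rw [show (List.replicate (e' + 1) '3' : List Char) = '3' :: List.replicate e' '3' by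
                    simp [List.replicate_succ]]
              rw [pv_step3_hit ((L ++ ['3', '3']) ++ ['2']) _ (by simp [hL])
                    (by simp [List.mem_replicate])]
              rw [pv_phase3 e' fuel (((L ++ ['3', '3']) ++ ['2']) ++ ['1']) (by simp [hL]) (by omega)]
              simp [List.replicate_succ]
            | zero =>
              rw [show (List.replicate 0 '3' : List Char) = [] from rfl,
                  pv_step3_miss ((L ++ ['3', '3']) ++ ['2']) [] (by simp [hL]) (by simp) (by simp)]
              rw [show (((L ++ ['3', '3']) ++ ['2']) ++ '>' :: ([] : List Char))
                    = ((L ++ ['3', '3']) ++ ['2']) ++ '>' :: List.replicate 0 '3' from rfl,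
                  pv_phase3 0 fuel ((L ++ ['3', '3']) ++ ['2']) (by simp [hL]) (by omega)]
              simp
        | zero =>
          simp only [List.replicate_zero, List.nil_append]
          cases e with
          | succ e' =>
            rw [show (List.replicate (e' + 1) '3' : List Char) = '3' :: List.replicate e' '3' by
                  simp [List.replicate_succ]]
            rw [pv_step2_miss (L ++ ['3', '3']) _ (by simp [hL])
                  (by simp [List.mem_replicate]) (by simp),
                pv_step3_hit (L ++ ['3', '3']) _ (by simp [hL]) (by simp [List.mem_replicate])]
            rw [pv_phase3 e' fuel ((L ++ ['3', '3']) ++ ['1']) (by simp [hL]) (by omega)]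
            simp [List.replicate_succ]
          | zero =>
            simp only [List.replicate_zero]
            rw [pv_step2_miss (L ++ ['3', '3']) [] (by simp [hL]) (by simp) (by simp),
                pv_step3_miss (L ++ ['3', '3']) [] (by simp [hL]) (by simp) (by simp)]
            rw [show ((L ++ ['3', '3']) ++ '>' :: ([] : List Char))
                  = (L ++ ['3', '3']) ++ '>' :: List.replicate 0 '3' from rfl,
                pv_phase3 0 fuel (L ++ ['3', '3']) (by simp [hL]) (by omega)]
            simp

theorem pv_main (n : Int) : f n = f_alt n := by
  unfold f f_alt
  rw [PySem.List.pyRepeat_singleton]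
  rw [show ('>' :: (List.replicate 37 '1' ++ List.replicate n.toNat '2' ++ List.replicate 37 '3'))
        = [] ++ '>' :: (List.replicate 37 '1' ++ (List.replicate n.toNat '2' ++ List.replicate 37 '3')) by
          simp]
  rw [pv_phase1 37 n.toNat 37 (75 + n.toNat) [] (by simp) (by omega)]
  simp

-- ===== VERDICT (by name: the statement is the Claim_ definition above) =====
theorem f_spec : Claim_equal_f := by
  intro n _
  exact pv_main n
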